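-- pv_equiv track=rewrite | github.com/apuiggros/BDM_PROJECT | ingestion/gutenberg_ingest.py | resolve_text_url
-- ===== SOURCE A (Python) =====
-- TEXT_FORMATS: list[str] = [
--     "text/plain; charset=utf-8",
--     "text/plain; charset=us-ascii",
--     "text/plain",
-- ]
--
-- def resolve_text_url(book: dict) -> str | None:
--     """
--     Extract the best available plain-text download URL from a Gutendex
--     book object by checking the `formats` dict in priority order.
--     """
--     formats: dict[str, str] = book.get("formats", {})
--     for fmt in TEXT_FORMATS:
--         url = formats.get(fmt)
--         if url:
--             return url
--     # Fallback: try any key that contains "plain"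
--     for fmt_key, url in formats.items():
--         if "plain" in fmt_key.lower():
--             return url
--     return None
-- ===== SOURCE B (Python) =====
-- TEXT_FORMATS: list[str] = [
--     "text/plain; charset=utf-8",
--     "text/plain; charset=us-ascii",
--     "text/plain",
-- ]
--
-- def resolve_text_url(book: dict) -> str | None:
--     """
--     Single pass over formats.items(): record, per priority index, the url of
--     the first occurrence of that TEXT_FORMATS key, and separately the url of
--     the first key containing 'plain'; then pick the best truthy priority url,
--     falling back to the first-plain url.
--     """
--     formats: dict[str, str] = book.get("formats", {})
--     prio = {fmt: i for i, fmt in enumerate(TEXT_FORMATS)}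
--     first_seen: dict[int, str] = {}
--     first_plain = None
--     for key, url in formats.items():
--         i = prio.get(key)
--         if i is not None and i not in first_seen:
--             first_seen[i] = url
--         if first_plain is None and "plain" in key.lower():
--             first_plain = url
--     for i in range(len(TEXT_FORMATS)):
--         u = first_seen.get(i)
--         if u:
--             return u
--     return first_plain
-- ===== Notes on version B (the rewrite author's own statement) =====
-- stated objective: alternative
-- what changed: A does one dict lookup per TEXT_FORMATS entry and then a second fallback scan over formats.items(); B makes a single pass over formats.items() with a precomputed key->priority map, recording the first url per priority index and the first 'plain' url, then picks the best truthy priority url with the first-plain url as fallback.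
import Mathlib
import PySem

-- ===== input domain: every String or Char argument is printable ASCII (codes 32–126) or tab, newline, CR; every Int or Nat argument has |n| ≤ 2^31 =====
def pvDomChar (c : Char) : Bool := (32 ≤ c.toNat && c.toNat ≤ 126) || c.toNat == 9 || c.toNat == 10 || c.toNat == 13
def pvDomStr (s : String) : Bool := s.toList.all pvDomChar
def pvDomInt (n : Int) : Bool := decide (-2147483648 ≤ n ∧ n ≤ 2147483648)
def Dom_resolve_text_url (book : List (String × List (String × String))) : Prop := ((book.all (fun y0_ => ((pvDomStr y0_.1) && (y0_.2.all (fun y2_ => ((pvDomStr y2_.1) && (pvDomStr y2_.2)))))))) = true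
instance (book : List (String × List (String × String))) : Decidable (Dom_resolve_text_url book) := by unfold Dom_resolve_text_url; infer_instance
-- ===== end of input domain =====

-- B replaces A's per-priority dict lookups (plus a second fallback scan) by ONE pass over
-- formats.items() recording the first url per priority index and the first 'plain' url (objective: alternative).

-- ===== PORT A =====
def TEXT_FORMATS : List String :=
  ["text/plain; charset=utf-8", "text/plain; charset=us-ascii", "text/plain"]

-- first loop of A: for fmt in TEXT_FORMATS: url = formats.get(fmt); if url: return url
def pvPhase1 (formats : List (String × String)) : List String → Option String
  | [] => none
  | fmt :: rest =>
    match PySem.Dict.get? (PySem.Dict.mk formats) fmt with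
    | some url => if url = "" then pvPhase1 formats rest else some url
    | none => pvPhase1 formats rest

-- second loop of A: for fmt_key, url in formats.items(): if "plain" in fmt_key.lower(): return url
def pvPhase2 : List (String × String) → Option String
  | [] => none
  | (fmt_key, url) :: rest =>
    if PySem.Str.isIn "plain" (PySem.Str.lower fmt_key) then some url else pvPhase2 rest

def resolve_text_url (book : List (String × List (String × String))) : Option String :=
  let formats := PySem.Dict.getD (PySem.Dict.mk book) "formats" []
  match pvPhase1 formats TEXT_FORMATS with
  | some url => some url
  | none => pvPhase2 formats

-- ===== PORT B =====
-- prio = {fmt: i for i, fmt in enumerate(TEXT_FORMATS)}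
def pvPrio : PySem.Dict String Int :=
  PySem.Dict.ofList ((PySem.List.enumerate TEXT_FORMATS).map (fun p => (p.2, p.1)))

-- the single pass of B over formats.items(), threading (first_seen, first_plain)
def pvLoop : List (String × String) → PySem.Dict Int String → Option String →
    PySem.Dict Int String × Option String
  | [], first_seen, first_plain => (first_seen, first_plain)
  | (key, url) :: rest, first_seen, first_plain =>
    let first_seen :=
      match PySem.Dict.get? pvPrio key with
      | some i => if (PySem.Dict.get? first_seen i).isNone then first_seen.insert i url else first_seen
      | none => first_seen
    let first_plain :=
      if first_plain.isNone && PySem.Str.isIn "plain" (PySem.Str.lower key) then some url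
      else first_plain
    pvLoop rest first_seen first_plain

-- for i in range(len(TEXT_FORMATS)): u = first_seen.get(i); if u: return u
def pvBest (first_seen : PySem.Dict Int String) : List Int → Option String
  | [] => none
  | i :: rest =>
    match PySem.Dict.get? first_seen i with
    | some u => if u = "" then pvBest first_seen rest else some u
    | none => pvBest first_seen rest

def resolve_text_url_alt (book : List (String × List (String × String))) : Option String :=
  let formats := PySem.Dict.getD (PySem.Dict.mk book) "formats" []
  let st := pvLoop formats PySem.Dict.empty none
  match pvBest st.1 (PySem.List.pyRange 0 (PySem.List.len TEXT_FORMATS) 1) with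
  | some u => some u
  | none => st.2

-- ===== PRECONDITION & SPEC =====
def Spec_resolve_text_url (book : List (String × List (String × String))) (out : Option String) : Prop := out = resolve_text_url_alt book
instance (book : List (String × List (String × String))) (out : Option String) : Decidable (Spec_resolve_text_url book out) := by unfold Spec_resolve_text_url; infer_instance

-- ===== CLAIM (what is proved, stated in full; the proofs are below) =====
def Claim_equal_resolve_text_url : Prop := ∀ (book : List (String × List (String × String))), Dom_resolve_text_url book → Spec_resolve_text_url book (resolve_text_url book)

-- ===== LEMMAS AND PROOFS =====

-- B's first_plain accumulator computes A's fallback scan.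
theorem pvLoop_plain (fs : List (String × String)) (seen : PySem.Dict Int String)
    (pl : Option String) : (pvLoop fs seen pl).2 = pl.or (pvPhase2 fs) := by
  induction fs generalizing seen pl with
  | nil => cases pl <;> simp [pvLoop, pvPhase2]
  | cons p rest ih =>
    obtain ⟨k, u⟩ := p
    simp only [pvLoop, pvPhase2]
    cases pl with
    | none =>
      cases h : PySem.Str.isIn "plain" (PySem.Str.lower k) <;>
        simp_all [Option.or]
    | some v => simp [ih, Option.or]

-- B's first_seen dict records, per index, the value of the first pair whose key maps to that index.
theorem pvLoop_seen (fs : List (String × String)) (seen : PySem.Dict Int String)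
    (pl : Option String) (i : Int) :
    (pvLoop fs seen pl).1.get? i =
      (seen.get? i).or ((fs.find? (fun p => pvPrio.get? p.1 == some i)).map Prod.snd) := by
  induction fs generalizing seen pl with
  | nil => cases h : seen.get? i <;> simp [pvLoop, Option.or, h]
  | cons p rest ih =>
    obtain ⟨k, u⟩ := p
    simp only [pvLoop, List.find?_cons]
    cases hk : pvPrio.get? k with
    | none => simp [ih]
    | some j =>
      by_cases hji : j = i
      · subst hji
        cases hs : seen.get? j with
        | none =>
          simp [hs, ih, PySem.Dict.get?_insert_self, Option.or]
        | some w => simp [hs, ih, Option.or]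
      · have hne : (some j == some i) = false := by simp [hji]
        have hins : (seen.insert j u).get? i = seen.get? i :=
          PySem.Dict.get?_insert_of_ne seen u (fun h => hji h.symm)
        cases hs : seen.get? j with
        | none => simp [hs, ih, hne, hins]
        | some w => simp [hs, ih, hne]

-- pvPrio lookups: get? pvPrio k = some j exactly on the j-th TEXT_FORMATS key.
theorem pvPrio_eq :
    pvPrio = PySem.Dict.mk [("text/plain; charset=utf-8", 0),
      ("text/plain; charset=us-ascii", 1), ("text/plain", 2)] := by decide

-- the first pair whose key has priority j is exactly formats.get(TEXT_FORMATS[j])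
theorem find_prio_eq_get (fs : List (String × String)) (j : Int) (fmt : String)
    (hj : ∀ k : String, pvPrio.get? k = some j ↔ k = fmt) :
    ((fs.find? (fun p => pvPrio.get? p.1 == some j)).map Prod.snd) =
      PySem.Dict.get? (PySem.Dict.mk fs) fmt := by
  induction fs with
  | nil => simp [PySem.Dict.get?]
  | cons p rest ih =>
    obtain ⟨k, u⟩ := p
    rw [PySem.Dict.get?_mk_cons, List.find?_cons]
    by_cases h : k = fmt
    · subst h
      have hc : (pvPrio.get? k == some j) = true := by simp [hj]
      simp [hc]
    · have hc : (pvPrio.get? k == some j) = false := by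
        simp only [beq_eq_false_iff_ne, ne_eq, hj]; exact h
      have hbeq : (k == fmt) = false := by simp [h]
      simp [hc, hbeq, ih]

theorem prio0 (k : String) : pvPrio.get? k = some 0 ↔ k = "text/plain; charset=utf-8" := by
  rw [pvPrio_eq]; simp only [PySem.Dict.get?_mk_cons]
  by_cases h0 : ("text/plain; charset=utf-8" : String) = k
  · rw [← h0]; decide
  · by_cases h1 : ("text/plain; charset=us-ascii" : String) = k
    · rw [← h1]; decide
    · by_cases h2 : ("text/plain" : String) = k
      · rw [← h2]; decide
      · simp [beq_eq_false_iff_ne.mpr h0, beq_eq_false_iff_ne.mpr h1,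
          beq_eq_false_iff_ne.mpr h2, PySem.Dict.get?, Ne.symm h0]
theorem prio1 (k : String) : pvPrio.get? k = some 1 ↔ k = "text/plain; charset=us-ascii" := by
  rw [pvPrio_eq]; simp only [PySem.Dict.get?_mk_cons]
  by_cases h0 : ("text/plain; charset=utf-8" : String) = k
  · rw [← h0]; decide
  · by_cases h1 : ("text/plain; charset=us-ascii" : String) = k
    · rw [← h1]; decide
    · by_cases h2 : ("text/plain" : String) = k
      · rw [← h2]; decide
      · simp [beq_eq_false_iff_ne.mpr h0, beq_eq_false_iff_ne.mpr h1,
          beq_eq_false_iff_ne.mpr h2, PySem.Dict.get?, Ne.symm h1]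
theorem prio2 (k : String) : pvPrio.get? k = some 2 ↔ k = "text/plain" := by
  rw [pvPrio_eq]; simp only [PySem.Dict.get?_mk_cons]
  by_cases h0 : ("text/plain; charset=utf-8" : String) = k
  · rw [← h0]; decide
  · by_cases h1 : ("text/plain; charset=us-ascii" : String) = k
    · rw [← h1]; decide
    · by_cases h2 : ("text/plain" : String) = k
      · rw [← h2]; decide
      · simp [beq_eq_false_iff_ne.mpr h0, beq_eq_false_iff_ne.mpr h1,
          beq_eq_false_iff_ne.mpr h2, PySem.Dict.get?, Ne.symm h2]

-- ===== VERDICT (by name: the statement is the Claim_ definition above) =====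
theorem resolve_text_url_spec : Claim_equal_resolve_text_url := by
  intro book _
  unfold Spec_resolve_text_url resolve_text_url resolve_text_url_alt
  set fs := PySem.Dict.getD (PySem.Dict.mk book) "formats" [] with hfs
  clear hfs
  have hrange : PySem.List.pyRange 0 (PySem.List.len TEXT_FORMATS) 1 = [0, 1, 2] := by decide
  rw [hrange]
  have hseen := fun i => pvLoop_seen fs PySem.Dict.empty none i
  simp only [PySem.Dict.get?_empty, Option.or] at hseen
  have hplain := pvLoop_plain fs PySem.Dict.empty none
  simp only [Option.or] at hplain
  have h0 := (find_prio_eq_get fs 0 _ prio0).symm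
  have h1 := (find_prio_eq_get fs 1 _ prio1).symm
  have h2 := (find_prio_eq_get fs 2 _ prio2).symm
  simp only [pvBest, hseen, pvPhase1, TEXT_FORMATS, hplain]
  rw [← h0, ← h1, ← h2]
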